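-- pv_equiv track=rewrite | github.com/grantzhao6/LeetCode | 1297-Maximum-Number-of-Occurrences-of-a-Substring.py | maxFreq
-- ===== SOURCE A (Python) =====
-- def maxFreq(s, maxLetters, minSize, maxSize):
--     """
--     :type s: str
--     :type maxLetters: int
--     :type minSize: int
--     :type maxSize: int
--     :rtype: int
--     """
--     counter = {}
--     l = 0
--     result = 0
--     for r in range(len(s)+1):
--         sub = s[l:r]
--         while minSize <= r-l <= maxSize:
--             if len(set(sub)) <= maxLetters:
--                 counter[sub] = 1 + counter.get(sub, 0)
--                 result = max(result, counter[sub])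
--             l += 1
--             sub = s[l:r]
--     return result
-- ===== SOURCE B (Python) =====
-- def maxFreq(s, maxLetters, minSize, maxSize):
--     if minSize < 1 or minSize > maxSize:
--         return 0
--     freq = {}
--     distinct = 0
--     counts = {}
--     best = 0
--     for i, ch in enumerate(s):
--         freq[ch] = freq.get(ch, 0) + 1
--         if freq[ch] == 1:
--             distinct += 1
--         if i >= minSize:
--             out = s[i - minSize]
--             freq[out] = freq[out] - 1
--             if freq[out] == 0:
--                 distinct -= 1
--         if i >= minSize - 1 and distinct <= maxLetters:
--             w = s[i - minSize + 1:i + 1]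
--             c = counts.get(w, 0) + 1
--             counts[w] = c
--             best = max(best, c)
--     return best
-- ===== Notes on version B (the rewrite author's own statement) =====
-- stated objective: alternative
-- what changed: B slides a fixed minSize-length window once over s, maintaining a char-frequency dict and an incremental distinct-char count, instead of A's two-pointer for/while loop that re-slices s[l:r] and rebuilds set(sub) for every window.
-- intended difference: On inputs with minSize <= 0 (and maxSize >= 0, maxLetters >= 0) A repeatedly counts the empty slice s[l:r] with l > r and returns len(s)+1-minSize, while B returns 0, the intended answer since no substring has a nonpositive length. — e.g. on maxFreq("", 0, 0, 0): A returns 1, B returns 0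
import Mathlib
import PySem

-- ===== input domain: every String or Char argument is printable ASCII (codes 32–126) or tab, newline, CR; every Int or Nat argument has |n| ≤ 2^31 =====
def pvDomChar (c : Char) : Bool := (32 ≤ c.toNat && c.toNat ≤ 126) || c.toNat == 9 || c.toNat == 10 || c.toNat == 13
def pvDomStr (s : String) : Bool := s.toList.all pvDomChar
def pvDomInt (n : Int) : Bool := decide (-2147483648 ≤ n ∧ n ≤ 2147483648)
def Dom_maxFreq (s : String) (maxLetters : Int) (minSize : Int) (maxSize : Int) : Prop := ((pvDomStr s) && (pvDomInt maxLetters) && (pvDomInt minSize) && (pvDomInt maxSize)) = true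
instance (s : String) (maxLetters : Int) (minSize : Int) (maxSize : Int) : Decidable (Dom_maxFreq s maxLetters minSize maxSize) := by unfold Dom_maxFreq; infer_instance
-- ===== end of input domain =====

-- B replaces A's for/while two-pointer scan (which re-slices s[l:r] and rebuilds set(sub) for
-- every window) by a single sliding minSize-window pass with an incrementally maintained
-- char-frequency dict and distinct-char count.

-- ===== PORT A =====
-- the inner 'while minSize <= r-l <= maxSize' loop of A
def maxFreqWhile (cs : List Char) (maxLetters minSize maxSize r : Int)
    (counter : PySem.Dict (List Char) Int) (l result : Int) :
    PySem.Dict (List Char) Int × Int × Int :=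
  if h : minSize ≤ r - l ∧ r - l ≤ maxSize then
    let sub := PySem.List.slice cs (some l) (some r)
    if ((PySem.Set.ofList sub).length : Int) ≤ maxLetters then
      maxFreqWhile cs maxLetters minSize maxSize r
        (counter.insert sub (1 + counter.getD sub 0)) (l + 1)
        (max result (1 + counter.getD sub 0))
    else
      maxFreqWhile cs maxLetters minSize maxSize r counter (l + 1) result
  else
    (counter, l, result)
termination_by (r - l - minSize + 1).toNat
decreasing_by all_goals omega

def maxFreq (s : String) (maxLetters : Int) (minSize : Int) (maxSize : Int) : Int :=
  ((PySem.List.pyRange 0 ((s.toList.length : Int) + 1) 1).foldl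
    (fun (st : PySem.Dict (List Char) Int × Int × Int) r =>
      maxFreqWhile s.toList maxLetters minSize maxSize r st.1 st.2.1 st.2.2)
    (PySem.Dict.empty, 0, 0)).2.2

-- ===== PORT B =====
-- one iteration of B's 'for i, ch in enumerate(s)' loop; state = (freq, distinct, counts, best)
def maxFreqAltStep (cs : List Char) (maxLetters minSize : Int)
    (st : PySem.Dict Char Int × Int × PySem.Dict (List Char) Int × Int)
    (p : Int × Char) : PySem.Dict Char Int × Int × PySem.Dict (List Char) Int × Int :=
  let i := p.1
  let ch := p.2
  let freq1 := st.1.insert ch (st.1.getD ch 0 + 1)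
  let distinct1 := if freq1.getD ch 0 = 1 then st.2.1 + 1 else st.2.1
  let fd :=
    if minSize ≤ i then
      -- s[i - minSize]: here 0 ≤ i - minSize < len(s), so the total pyGetD is exact
      let out := PySem.List.pyGetD cs (i - minSize) ' '
      let freq2 := freq1.insert out (freq1.getD out 0 - 1)
      let distinct2 := if freq2.getD out 0 = 0 then distinct1 - 1 else distinct1
      (freq2, distinct2)
    else (freq1, distinct1)
  if minSize - 1 ≤ i ∧ fd.2 ≤ maxLetters then
    let w := PySem.List.slice cs (some (i - minSize + 1)) (some (i + 1))
    let c := st.2.2.1.getD w 0 + 1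
    (fd.1, fd.2, st.2.2.1.insert w c, max st.2.2.2 c)
  else (fd.1, fd.2, st.2.2.1, st.2.2.2)

def maxFreq_alt (s : String) (maxLetters : Int) (minSize : Int) (maxSize : Int) : Int :=
  if minSize < 1 ∨ maxSize < minSize then 0
  else
    ((PySem.List.enumerate s.toList 0).foldl (maxFreqAltStep s.toList maxLetters minSize)
      (PySem.Dict.empty, 0, PySem.Dict.empty, 0)).2.2.2

-- ===== PRECONDITION & SPEC =====
-- On inputs with minSize ≤ 0 (and 0 ≤ maxSize, 0 ≤ maxLetters) A repeatedly counts the empty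
-- slice s[l:r] with l > r and returns len(s)+1-minSize, while B returns 0, the intended answer
-- since no substring has a nonpositive length.
def D_maxFreq (s : String) (maxLetters : Int) (minSize : Int) (maxSize : Int) : Prop :=
  minSize ≤ 0 ∧ 0 ≤ maxSize ∧ 0 ≤ maxLetters
instance (s : String) (maxLetters : Int) (minSize : Int) (maxSize : Int) : Decidable (D_maxFreq s maxLetters minSize maxSize) := by unfold D_maxFreq; infer_instance

def Spec_maxFreq (s : String) (maxLetters : Int) (minSize : Int) (maxSize : Int) (out : Int) : Prop := ¬ D_maxFreq s maxLetters minSize maxSize → out = maxFreq_alt s maxLetters minSize maxSize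
instance (s : String) (maxLetters : Int) (minSize : Int) (maxSize : Int) (out : Int) : Decidable (Spec_maxFreq s maxLetters minSize maxSize out) := by unfold Spec_maxFreq; infer_instance

def pvDiffWitness_maxFreq : String × Int × Int × Int := ("", 0, 0, 0)
def pvDiffWitnessOut_maxFreq : Int × Int := (1, 0)

-- ===== CLAIM (what is proved, stated in full; the proofs are below) =====
def Claim_unchanged_maxFreq : Prop := ∀ (s : String) (maxLetters : Int) (minSize : Int) (maxSize : Int), Dom_maxFreq s maxLetters minSize maxSize → Spec_maxFreq s maxLetters minSize maxSize (maxFreq s maxLetters minSize maxSize)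
def Claim_changed_maxFreq : Prop := Dom_maxFreq (pvDiffWitness_maxFreq.1) (pvDiffWitness_maxFreq.2.1) (pvDiffWitness_maxFreq.2.2.1) (pvDiffWitness_maxFreq.2.2.2) ∧ D_maxFreq (pvDiffWitness_maxFreq.1) (pvDiffWitness_maxFreq.2.1) (pvDiffWitness_maxFreq.2.2.1) (pvDiffWitness_maxFreq.2.2.2) ∧ maxFreq (pvDiffWitness_maxFreq.1) (pvDiffWitness_maxFreq.2.1) (pvDiffWitness_maxFreq.2.2.1) (pvDiffWitness_maxFreq.2.2.2) = pvDiffWitnessOut_maxFreq.1 ∧ maxFreq_alt (pvDiffWitness_maxFreq.1) (pvDiffWitness_maxFreq.2.1) (pvDiffWitness_maxFreq.2.2.1) (pvDiffWitness_maxFreq.2.2.2) = pvDiffWitnessOut_maxFreq.2 ∧ pvDiffWitnessOut_maxFreq.1 ≠ pvDiffWitnessOut_maxFreq.2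

-- ===== LEMMAS AND PROOFS =====

-- the common reference: fold the per-window counting step over the list of minSize-windows
def winStep (maxLetters : Int) (st : PySem.Dict (List Char) Int × Int) (w : List Char) :
    PySem.Dict (List Char) Int × Int :=
  if ((PySem.Set.ofList w).length : Int) ≤ maxLetters then
    (st.1.insert w (1 + st.1.getD w 0), max st.2 (1 + st.1.getD w 0))
  else st

-- the minSize-windows whose right end is < k
def wins (cs : List Char) (m k : Nat) : List (List Char) :=
  (List.range (k - m)).map (fun j => (cs.drop j).take m)

theorem while_skip (cs : List Char) (mL mS MX r : Int) (d : PySem.Dict (List Char) Int)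
    (l res : Int) (h : ¬ (mS ≤ r - l ∧ r - l ≤ MX)) :
    maxFreqWhile cs mL mS MX r d l res = (d, l, res) := by
  rw [maxFreqWhile]; exact dif_neg h

theorem while_one (cs : List Char) (mL mS MX r : Int) (d : PySem.Dict (List Char) Int)
    (l res : Int) (h1 : r - l = mS) (h2 : mS ≤ MX) :
    maxFreqWhile cs mL mS MX r d l res =
      (let sub := PySem.List.slice cs (some l) (some r)
       if ((PySem.Set.ofList sub).length : Int) ≤ mL then
         (d.insert sub (1 + d.getD sub 0), l + 1, max res (1 + d.getD sub 0))
       else (d, l + 1, res)) := by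
  rw [maxFreqWhile]
  rw [dif_pos ⟨by omega, by omega⟩]
  simp only
  split
  · rw [while_skip _ _ _ _ _ _ _ _ (by omega)]
  · rw [while_skip _ _ _ _ _ _ _ _ (by omega)]

theorem setLen_eq_card {α : Type} [DecidableEq α] (xs : List α) :
    (PySem.Set.ofList xs).length = xs.toFinset.card := by
  have h1 : (PySem.Set.ofList xs).toFinset = xs.toFinset := by
    ext a; simp [List.mem_toFinset, PySem.Set.mem_ofList]
  rw [← List.toFinset_card_of_nodup (PySem.Set.nodup_ofList xs), h1]

theorem card_append_singleton {α : Type} [DecidableEq α] (xs : List α) (a : α) :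
    ((xs ++ [a]).toFinset.card : Int)
      = xs.toFinset.card + (if a ∈ xs then 0 else 1) := by
  rw [List.toFinset_append]
  have h2 : xs.toFinset ∪ [a].toFinset = insert a xs.toFinset := by
    ext x; simp
  rw [h2]
  by_cases h : a ∈ xs
  · rw [Finset.insert_eq_self.mpr (by simpa using h)]; simp [h]
  · rw [Finset.card_insert_of_notMem (by simpa using h)]; simp [h]

theorem card_cons {α : Type} [DecidableEq α] (a : α) (xs : List α) :
    ((a :: xs).toFinset.card : Int)
      = xs.toFinset.card + (if a ∈ xs then 0 else 1) := by
  rw [List.toFinset_cons]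
  by_cases h : a ∈ xs
  · rw [Finset.insert_eq_self.mpr (by simpa using h)]; simp [h]
  · rw [Finset.card_insert_of_notMem (by simpa using h)]; simp [h]

-- A's fold over r = 0..k-1 (case 1 ≤ minSize ≤ maxSize)
theorem A_fold (cs : List Char) (mL MX : Int) (m : Nat) (hm : 1 ≤ m) (hMX : (m : Int) ≤ MX) :
    ∀ k : Nat,
      (PySem.List.pyRange 0 (k : Int) 1).foldl
        (fun (st : PySem.Dict (List Char) Int × Int × Int) r =>
          maxFreqWhile cs mL (m : Int) MX r st.1 st.2.1 st.2.2)
        (PySem.Dict.empty, 0, 0)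
      = (((wins cs m k).foldl (winStep mL) (PySem.Dict.empty, 0)).1,
         max 0 ((k : Int) - (m : Int)),
         ((wins cs m k).foldl (winStep mL) (PySem.Dict.empty, 0)).2) := by
  intro k
  induction k with
  | zero =>
    rw [show ((0 : Nat) : Int) = 0 from by norm_num, PySem.List.pyRange_one_eq_nil le_rfl]
    simp only [List.foldl_nil, wins, Nat.zero_sub, List.range_zero, List.map_nil]
    refine Prod.ext rfl (Prod.ext ?_ rfl)
    simp only
    omega
  | succ k ih =>
    have hc : ((k + 1 : Nat) : Int) = (k : Int) + 1 := by push_cast; ring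
    rw [hc, PySem.List.pyRange_one_succ_right (by positivity), List.foldl_append, ih]
    simp only [List.foldl_cons, List.foldl_nil]
    by_cases hk : k < m
    · -- the window is still too short: the while is skipped
      rw [while_skip _ _ _ _ _ _ _ _ (by omega)]
      have hw : wins cs m (k + 1) = wins cs m k := by
        unfold wins
        congr 2
        omega
      rw [hw]
      refine Prod.ext rfl (Prod.ext ?_ rfl)
      simp only
      omega
    · -- k ≥ m: exactly one while iteration, on the window ending at k
      push_neg at hk
      have hl : max 0 ((k : Int) - (m : Int)) = ((k - m : Nat) : Int) := by push_cast; omega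
      rw [hl, while_one _ _ _ _ _ _ _ _ (by push_cast; omega) hMX]
      have hslice : PySem.List.slice cs (some ((k - m : Nat) : Int)) (some (k : Int))
          = (cs.drop (k - m)).take m := by
        rw [PySem.List.slice_natCast cs (k - m) k]
        congr 1
        omega
      have hw : wins cs m (k + 1) = wins cs m k ++ [(cs.drop (k - m)).take m] := by
        unfold wins
        rw [show k + 1 - m = (k - m) + 1 from by omega, List.range_succ, List.map_append]
        rfl
      rw [hw, List.foldl_append]
      simp only [List.foldl_cons, List.foldl_nil, hslice, winStep]
      split
      · refine Prod.ext rfl (Prod.ext ?_ rfl)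
        simp only
        push_cast
        omega
      · refine Prod.ext rfl (Prod.ext ?_ rfl)
        simp only
        push_cast
        omega

-- one B step: from the state for the first k chars to the state for the first k+1 chars
theorem alt_step (cs : List Char) (mL : Int) (m k : Nat) (hm : 1 ≤ m) (hk : k < cs.length)
    (freq : PySem.Dict Char Int) (P : PySem.Dict (List Char) Int × Int)
    (hcnt : ∀ c : Char, freq.getD c 0 = (((cs.take k).drop (k - m)).count c : Int)) :
    ∃ freq' : PySem.Dict Char Int,
      maxFreqAltStep cs mL (m : Int)
        (freq, ((((cs.take k).drop (k - m)).toFinset.card : Nat) : Int), P.1, P.2)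
        ((k : Int), cs[k])
      = (freq', (((cs.take (k + 1)).drop (k + 1 - m)).toFinset.card : Int),
         (if m ≤ k + 1 then winStep mL P ((cs.take (k + 1)).drop (k + 1 - m)) else P).1,
         (if m ≤ k + 1 then winStep mL P ((cs.take (k + 1)).drop (k + 1 - m)) else P).2)
      ∧ ∀ c : Char, freq'.getD c 0 = (((cs.take (k + 1)).drop (k + 1 - m)).count c : Int) := by
  have hlen : (cs.take k).length = k := by simp; omega
  set W := (cs.take k).drop (k - m) with hWdef
  set W' := (cs.take (k + 1)).drop (k + 1 - m) with hW'def
  have htake : cs.take (k + 1) = cs.take k ++ [cs[k]] := by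
    rw [List.take_add_one]
    simp [List.getElem?_eq_getElem hk]
  set ch := cs[k] with hchdef
  -- facts about freq1
  have hfreq1 : ∀ c : Char,
      (freq.insert ch (freq.getD ch 0 + 1)).getD c 0 = ((W ++ [ch]).count c : Int) := by
    intro c
    rw [PySem.Dict.getD_insert]
    by_cases hc : c = ch
    · rw [if_pos hc, hc, hcnt ch, List.count_append]; simp
    · rw [if_neg hc, hcnt c, List.count_append]; simp [List.count_eq_zero, hc]
  have hdist1 :
      (if (freq.insert ch (freq.getD ch 0 + 1)).getD ch 0 = 1
        then ((W.toFinset.card : Nat) : Int) + 1 else ((W.toFinset.card : Nat) : Int))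
      = (((W ++ [ch]).toFinset.card : Nat) : Int) := by
    rw [hfreq1 ch, card_append_singleton]
    by_cases hmem : ch ∈ W
    · have hpos := List.count_pos_iff.mpr hmem
      rw [if_neg (by rw [List.count_append]; simp; push_cast; omega), if_pos hmem]; ring
    · rw [if_pos (by rw [List.count_append]; simp [List.count_eq_zero.mpr hmem]),
          if_neg hmem]
  by_cases hkm : m ≤ k
  · -- full window: the char cs[k-m] slides out
    have hWcons : W = cs[k - m]'(by omega) :: (cs.take k).drop (k - m + 1) := by
      rw [hWdef, List.drop_eq_getElem_cons (by rw [hlen]; omega : k - m < (cs.take k).length)]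
      congr 1
      exact List.getElem_take
    have hW' : W' = (cs.take k).drop (k - m + 1) ++ [ch] := by
      rw [hW'def, htake, List.drop_append_of_le_length (by omega)]
      congr 2
      omega
    have hM : W ++ [ch] = cs[k - m]'(by omega) :: W' := by
      rw [hW', hWcons]; rfl
    have hout : PySem.List.pyGetD cs ((k : Int) - (m : Int)) ' ' = cs[k - m]'(by omega) := by
      rw [show (k : Int) - (m : Int) = ((k - m : Nat) : Int) from by push_cast; omega,
          PySem.List.pyGetD_natCast, List.getD_eq_getElem cs ' ' (by omega)]
    refine ⟨(freq.insert ch (freq.getD ch 0 + 1)).insert (cs[k - m]'(by omega))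
      ((freq.insert ch (freq.getD ch 0 + 1)).getD (cs[k - m]'(by omega)) 0 - 1), ?_, ?_⟩
    · unfold maxFreqAltStep
      simp only
      rw [hout]
      rw [if_pos (show (m : Int) ≤ (k : Int) from by exact_mod_cast hkm)]
      simp only
      have hfreq2out : ((freq.insert ch (freq.getD ch 0 + 1)).insert (cs[k - m]'(by omega))
          ((freq.insert ch (freq.getD ch 0 + 1)).getD (cs[k - m]'(by omega)) 0 - 1)).getD
          (cs[k - m]'(by omega)) 0 = ((W'.count (cs[k - m]'(by omega)) : Nat) : Int) := by
        rw [PySem.Dict.getD_insert, if_pos rfl, hfreq1, hM]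
        simp [List.count_cons]
      rw [hfreq2out, hdist1]
      have hcardM : (((W ++ [ch]).toFinset.card : Nat) : Int)
          = ((W'.toFinset.card : Nat) : Int) + (if (cs[k - m]'(by omega)) ∈ W' then 0 else 1) := by
        rw [hM, card_cons]
      have hdist2 : (if ((W'.count (cs[k - m]'(by omega)) : Nat) : Int) = 0
            then (((W ++ [ch]).toFinset.card : Nat) : Int) - 1
            else (((W ++ [ch]).toFinset.card : Nat) : Int))
          = ((W'.toFinset.card : Nat) : Int) := by
        by_cases hmem2 : (cs[k - m]'(by omega)) ∈ W'
        · rw [if_neg (by have := List.count_pos_iff.mpr hmem2; omega), hcardM, if_pos hmem2]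
          ring
        · rw [if_pos (by rw [List.count_eq_zero.mpr hmem2]; norm_num), hcardM, if_neg hmem2]
          ring
      rw [hdist2]
      have hwslice : PySem.List.slice cs (some ((k : Int) - (m : Int) + 1))
          (some ((k : Int) + 1)) = W' := by
        rw [show (k : Int) - (m : Int) + 1 = ((k + 1 - m : Nat) : Int) from by push_cast; omega,
            show (k : Int) + 1 = ((k + 1 : Nat) : Int) from by push_cast; ring,
            PySem.List.slice_natCast cs (k + 1 - m) (k + 1), hW'def, List.drop_take]
      rw [hwslice, if_pos (show m ≤ k + 1 from by omega)]
      unfold winStep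
      rw [setLen_eq_card]
      by_cases hcond : ((W'.toFinset.card : Nat) : Int) ≤ mL
      · rw [if_pos ⟨by push_cast; omega, hcond⟩, if_pos hcond]
        simp [Int.add_comm]
      · rw [if_neg (by rintro ⟨_, h⟩; exact hcond h), if_neg hcond]
    · intro c
      rw [PySem.Dict.getD_insert]
      by_cases hc : c = cs[k - m]'(by omega)
      · rw [if_pos hc, hc, hfreq1, hM]; simp [List.count_cons]
      · rw [if_neg hc, hfreq1, hM]; simp [List.count_cons, Ne.symm hc]
  · -- short window: nothing slides out, W' = W ++ [ch]
    have hW' : W' = W ++ [ch] := by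
      rw [hW'def, hWdef, htake, show k + 1 - m = 0 from by omega,
          show k - m = 0 from by omega]
      simp
    refine ⟨freq.insert ch (freq.getD ch 0 + 1), ?_, ?_⟩
    · unfold maxFreqAltStep
      simp only
      rw [if_neg (show ¬((m : Int) ≤ (k : Int)) from by omega)]
      simp only
      rw [hdist1, ← hW']
      by_cases hm1 : m ≤ k + 1
      · have hwslice : PySem.List.slice cs (some ((k : Int) - (m : Int) + 1))
            (some ((k : Int) + 1)) = W' := by
          rw [show (k : Int) - (m : Int) + 1 = ((k + 1 - m : Nat) : Int) from by push_cast; omega,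
              show (k : Int) + 1 = ((k + 1 : Nat) : Int) from by push_cast; ring,
              PySem.List.slice_natCast cs (k + 1 - m) (k + 1), hW'def, List.drop_take]
        rw [hwslice, if_pos hm1]
        unfold winStep
        rw [setLen_eq_card]
        by_cases hcond : ((W'.toFinset.card : Nat) : Int) ≤ mL
        · rw [if_pos ⟨by push_cast; omega, hcond⟩, if_pos hcond]
          simp [Int.add_comm]
        · rw [if_neg (by rintro ⟨_, h⟩; exact hcond h), if_neg hcond]
      · rw [if_neg (by rintro ⟨h1, _⟩; push_cast at h1; omega), if_neg hm1]
    · intro c; rw [hfreq1 c, hW']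

-- B's fold over the first k characters
theorem B_fold (cs : List Char) (mL : Int) (m : Nat) (hm : 1 ≤ m) :
    ∀ k : Nat, k ≤ cs.length →
      ∃ freq : PySem.Dict Char Int,
        (PySem.List.enumerate (cs.take k) 0).foldl (maxFreqAltStep cs mL (m : Int))
          (PySem.Dict.empty, 0, PySem.Dict.empty, 0)
        = (freq, (((cs.take k).drop (k - m)).toFinset.card : Int),
           ((wins cs m (k + 1)).foldl (winStep mL) (PySem.Dict.empty, 0)).1,
           ((wins cs m (k + 1)).foldl (winStep mL) (PySem.Dict.empty, 0)).2)
        ∧ ∀ c : Char, freq.getD c 0 = (((cs.take k).drop (k - m)).count c : Int) := by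
  intro k
  induction k with
  | zero =>
    intro _
    refine ⟨PySem.Dict.empty, ?_, ?_⟩
    · simp only [List.take_zero, PySem.List.enumerate_nil, List.foldl_nil]
      have hw : wins cs m 1 = [] := by
        unfold wins; rw [show 1 - m = 0 from by omega]; rfl
      rw [hw]
      simp
    · intro c
      simp [PySem.Dict.getD_empty]
  | succ k ih =>
    intro hk1
    have hk : k < cs.length := by omega
    obtain ⟨freq, hfold, hcnt⟩ := ih (by omega)
    have htake : cs.take (k + 1) = cs.take k ++ [cs[k]] := by
      rw [List.take_add_one]; simp [List.getElem?_eq_getElem hk]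
    have henum : PySem.List.enumerate (cs.take (k + 1)) 0
        = PySem.List.enumerate (cs.take k) 0 ++ [((k : Int), cs[k])] := by
      rw [htake, PySem.List.enumerate_append, PySem.List.enumerate_cons,
          PySem.List.enumerate_nil]
      have hlen : (0 : Int) + ((cs.take k).length : Int) = (k : Int) := by simp; omega
      rw [hlen]
    rw [henum, List.foldl_append, hfold]
    simp only [List.foldl_cons, List.foldl_nil]
    obtain ⟨freq', hstep, hcnt'⟩ := alt_step cs mL m k hm hk freq
      ((wins cs m (k + 1)).foldl (winStep mL) (PySem.Dict.empty, 0)) hcnt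
    rw [hstep]
    refine ⟨freq', ?_, hcnt'⟩
    by_cases hm1 : m ≤ k + 1
    · have hw : wins cs m (k + 1 + 1) = wins cs m (k + 1) ++ [(cs.drop (k + 1 - m)).take m] := by
        unfold wins
        rw [show k + 1 + 1 - m = (k + 1 - m) + 1 from by omega, List.range_succ, List.map_append]
        rfl
      have hW'w : (cs.take (k + 1)).drop (k + 1 - m) = (cs.drop (k + 1 - m)).take m := by
        rw [List.drop_take]; congr 1; omega
      rw [if_pos hm1, hw, List.foldl_append]
      simp only [List.foldl_cons, List.foldl_nil]
      rw [hW'w]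
    · have hw : wins cs m (k + 1 + 1) = wins cs m (k + 1) := by
        unfold wins; congr 2; omega
      rw [if_neg hm1, hw]

-- main agreement, case 1 ≤ minSize ≤ maxSize
theorem main_case (s : String) (mL MX : Int) (m : Nat) (hm : 1 ≤ m) (hMX : (m : Int) ≤ MX) :
    maxFreq s mL (m : Int) MX = maxFreq_alt s mL (m : Int) MX := by
  unfold maxFreq maxFreq_alt
  rw [if_neg (by rintro (h | h) <;> omega)]
  have hc : ((s.toList.length : Int) + 1) = ((s.toList.length + 1 : Nat) : Int) := by
    push_cast; ring
  rw [hc, A_fold s.toList mL MX m hm hMX (s.toList.length + 1)]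
  obtain ⟨freq, hfold, -⟩ := B_fold s.toList mL m hm s.toList.length le_rfl
  rw [List.take_length] at hfold
  rw [hfold]

-- case maxSize < minSize: the while condition is contradictory, A returns 0
theorem case_lt (s : String) (mL mS MX : Int) (h : MX < mS) :
    maxFreq s mL mS MX = 0 := by
  unfold maxFreq
  have hstep : ∀ (st : PySem.Dict (List Char) Int × Int × Int) (r : Int),
      maxFreqWhile s.toList mL mS MX r st.1 st.2.1 st.2.2 = st := by
    intro st r
    rw [while_skip _ _ _ _ _ _ _ _ (by omega)]
  simp only [hstep]
  rw [PySem.List.foldl_ignore]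

-- case maxSize < 0: l stays 0 and r - 0 = r ≥ 0 > maxSize, so the while never runs
theorem case_negMax (s : String) (mL mS MX : Int) (h : MX < 0) :
    maxFreq s mL mS MX = 0 := by
  have key : ∀ k : Nat,
      (PySem.List.pyRange 0 (k : Int) 1).foldl
        (fun (st : PySem.Dict (List Char) Int × Int × Int) r =>
          maxFreqWhile s.toList mL mS MX r st.1 st.2.1 st.2.2)
        (PySem.Dict.empty, 0, 0) = (PySem.Dict.empty, 0, 0) := by
    intro k
    induction k with
    | zero =>
      rw [show ((0 : Nat) : Int) = 0 from by norm_num, PySem.List.pyRange_one_eq_nil le_rfl]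
      rfl
    | succ k ih =>
      have hc : ((k + 1 : Nat) : Int) = (k : Int) + 1 := by push_cast; ring
      rw [hc, PySem.List.pyRange_one_succ_right (by positivity), List.foldl_append, ih]
      simp only [List.foldl_cons, List.foldl_nil]
      rw [while_skip _ _ _ _ _ _ _ _ (by omega)]
  unfold maxFreq
  have hc : ((s.toList.length : Int) + 1) = ((s.toList.length + 1 : Nat) : Int) := by
    push_cast; ring
  rw [hc, key]

-- case maxLetters < 0: the distinct-count test (a nonneg length ≤ maxLetters) never passes
theorem while_negL (cs : List Char) (mL mS MX : Int) (hmL : mL < 0) :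
    ∀ (N : Nat) (r l res : Int) (d : PySem.Dict (List Char) Int),
      (r - l - mS + 1).toNat ≤ N →
      ∃ l', maxFreqWhile cs mL mS MX r d l res = (d, l', res) := by
  intro N
  induction N with
  | zero =>
    intro r l res d hN
    exact ⟨l, while_skip _ _ _ _ _ _ _ _ (by omega)⟩
  | succ N ih =>
    intro r l res d hN
    rw [maxFreqWhile]
    split
    · next hcond =>
      rw [if_neg (by
        intro habs
        have : (0 : Int) ≤ ((PySem.Set.ofList (PySem.List.slice cs (some l) (some r))).length : Int) :=
          Int.natCast_nonneg _
        omega)]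
      exact ih r (l + 1) res d (by omega)
    · exact ⟨l, rfl⟩

theorem case_negLetters (s : String) (mL mS MX : Int) (h : mL < 0) :
    maxFreq s mL mS MX = 0 := by
  have key : ∀ k : Nat, ∃ l : Int,
      (PySem.List.pyRange 0 (k : Int) 1).foldl
        (fun (st : PySem.Dict (List Char) Int × Int × Int) r =>
          maxFreqWhile s.toList mL mS MX r st.1 st.2.1 st.2.2)
        (PySem.Dict.empty, 0, 0) = (PySem.Dict.empty, l, 0) := by
    intro k
    induction k with
    | zero =>
      exact ⟨0, by
        rw [show ((0 : Nat) : Int) = 0 from by norm_num, PySem.List.pyRange_one_eq_nil le_rfl]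
        rfl⟩
    | succ k ih =>
      obtain ⟨l, hl⟩ := ih
      have hc : ((k + 1 : Nat) : Int) = (k : Int) + 1 := by push_cast; ring
      rw [hc, PySem.List.pyRange_one_succ_right (by positivity), List.foldl_append, hl]
      simp only [List.foldl_cons, List.foldl_nil]
      exact while_negL s.toList mL mS MX h ((k - l - mS + 1).toNat) (k : Int) l 0
        PySem.Dict.empty le_rfl
  unfold maxFreq
  have hc : ((s.toList.length : Int) + 1) = ((s.toList.length + 1 : Nat) : Int) := by
    push_cast; ring
  obtain ⟨l, hl⟩ := key (s.toList.length + 1)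
  rw [hc, hl]

-- ===== VERDICT (by name: the statement is the Claim_ definition above) =====
theorem maxFreq_spec : Claim_unchanged_maxFreq := by
  intro s mL mS MX _hdom hD
  unfold D_maxFreq at hD
  push_neg at hD
  by_cases h1 : MX < mS
  · rw [case_lt s mL mS MX h1]
    unfold maxFreq_alt
    rw [if_pos (Or.inr h1)]
  · push_neg at h1
    by_cases h2 : 1 ≤ mS
    · have hmS : mS = ((mS.toNat : Nat) : Int) := by omega
      rw [hmS] at h1 ⊢
      exact main_case s mL MX mS.toNat (by omega) h1
    · have hms0 : mS ≤ 0 := by omega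
      have hB : maxFreq_alt s mL mS MX = 0 := by
        unfold maxFreq_alt; rw [if_pos (Or.inl (by omega))]
      rcases lt_or_ge MX 0 with hMX | hMX
      · rw [case_negMax s mL mS MX hMX, hB]
      · rw [case_negLetters s mL mS MX (hD hms0 hMX), hB]

theorem maxFreq_changed : Claim_changed_maxFreq := by
  unfold Claim_changed_maxFreq
  refine ⟨by decide, by unfold D_maxFreq; decide, ?_, by decide, by decide⟩
  show maxFreq "" 0 0 0 = 1
  unfold maxFreq
  rw [show ("".toList : List Char) = [] from rfl]
  norm_num
  rw [show PySem.List.pyRange 0 1 1 = [0] from by decide]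
  simp only [List.foldl_cons, List.foldl_nil]
  rw [while_one _ _ _ _ _ _ _ _ (by norm_num) (by norm_num)]
  decide
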